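-- pv_equiv track=rewrite | github.com/kevanwee/codeoflaw | elitiscrape.py | _clean_judge_name
-- ===== SOURCE A (Python) =====
-- def _clean_judge_name(judge_raw: str) -> str:
--     judge = judge_raw.replace(":", "").strip()
--     lowered = judge.lower()
--     for marker in ["(delivering", "(with whom", "(for the court"]:
--         marker_index = lowered.find(marker)
--         if marker_index != -1:
--             judge = judge[:marker_index].strip()
--             lowered = judge.lower()
--     return judge or "Unknown"
-- ===== SOURCE B (Python) =====
-- def _clean_judge_name(judge_raw: str) -> str:
--     judge = judge_raw.replace(":", "").strip()
--     lowered = judge.lower()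
--     hits = [i for i in (lowered.find(m) for m in ("(delivering", "(with whom", "(for the court")) if i != -1]
--     if hits:
--         judge = judge[:min(hits)].strip()
--     return judge or "Unknown"
-- ===== Notes on version B (the rewrite author's own statement) =====
-- stated objective: simpler
-- what changed: Replaces the mutating truncate-and-re-lower loop over the three markers with a single pass: compute each marker's position in the original lowered string once, cut at the minimum found position in one slice, then strip.
import Mathlib
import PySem

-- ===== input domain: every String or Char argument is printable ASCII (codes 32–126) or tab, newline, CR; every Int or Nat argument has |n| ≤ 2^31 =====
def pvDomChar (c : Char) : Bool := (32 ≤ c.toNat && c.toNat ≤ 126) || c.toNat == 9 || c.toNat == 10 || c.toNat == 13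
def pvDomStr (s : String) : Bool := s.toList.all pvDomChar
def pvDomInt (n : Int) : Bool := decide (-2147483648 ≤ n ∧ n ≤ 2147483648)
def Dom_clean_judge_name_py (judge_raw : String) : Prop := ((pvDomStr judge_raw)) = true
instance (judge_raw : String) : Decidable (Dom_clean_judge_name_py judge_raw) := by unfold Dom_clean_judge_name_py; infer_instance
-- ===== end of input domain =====

-- B replaces A's mutating truncate-and-re-lower marker loop by computing each marker's
-- position in the lowered string once and cutting at the minimum found position in a
-- single slice (objective: simpler, one pass). Return value only; no argument is mutated.

-- ===== PORT A =====
-- the three markers, as character lists ("(delivering", "(with whom", "(for the court")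
def pvMarkers : List (List Char) := [['(', 'd', 'e', 'l', 'i', 'v', 'e', 'r', 'i', 'n', 'g'], ['(', 'w', 'i', 't', 'h', ' ', 'w', 'h', 'o', 'm'], ['(', 'f', 'o', 'r', ' ', 't', 'h', 'e', ' ', 'c', 'o', 'u', 'r', 't']]

-- one iteration of A's 'for marker in [...]' loop, state = (judge, lowered)
def pvStepA (st : List Char × List Char) (marker : List Char) : List Char × List Char :=
  let mi := PySem.Chars.find st.2 marker
  if mi ≠ -1 then
    let j := PySem.Chars.strip (PySem.List.slice st.1 none (some mi))
    (j, PySem.Chars.lower j)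
  else st

def clean_judge_name_py (judge_raw : String) : String :=
  let judge := PySem.Chars.strip (PySem.Chars.replace judge_raw.toList [':'] [])
  let st := pvMarkers.foldl pvStepA (judge, PySem.Chars.lower judge)
  if st.1 = [] then "Unknown" else String.ofList st.1

-- ===== PORT B =====
def clean_judge_name_py_alt (judge_raw : String) : String :=
  let judge := PySem.Chars.strip (PySem.Chars.replace judge_raw.toList [':'] [])
  let lowered := PySem.Chars.lower judge
  let hits := (pvMarkers.map (fun m => PySem.Chars.find lowered m)).filter (fun i => i ≠ -1)
  let judge' : List Char := match hits with
    | [] => judge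
    | h :: t => PySem.Chars.strip (PySem.List.slice judge none (some (t.foldl min h)))
  if judge' = [] then "Unknown" else String.ofList judge'

-- ===== PRECONDITION & SPEC =====
def Spec_clean_judge_name_py (judge_raw : String) (out : String) : Prop := out = clean_judge_name_py_alt judge_raw
instance (judge_raw : String) (out : String) : Decidable (Spec_clean_judge_name_py judge_raw out) := by unfold Spec_clean_judge_name_py; infer_instance

-- ===== CLAIM (what is proved, stated in full; the proofs are below) =====
def Claim_equal_clean_judge_name_py : Prop := ∀ (judge_raw : String), Dom_clean_judge_name_py judge_raw → Spec_clean_judge_name_py judge_raw (clean_judge_name_py judge_raw)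

-- ===== LEMMAS AND PROOFS =====

theorem pv_rstrip_decomp (t : List Char) :
    ∃ sfx, t = PySem.Chars.rstrip t ++ sfx ∧ ∀ c ∈ sfx, PySem.Chars.isspace c = true := by
  refine ⟨(t.reverse.takeWhile PySem.Chars.isspace).reverse, ?_, ?_⟩
  · simp only [PySem.Chars.rstrip]
    rw [← List.reverse_append, List.takeWhile_append_dropWhile, List.reverse_reverse]
  · intro c hc
    rw [List.mem_reverse] at hc
    exact List.mem_takeWhile_imp hc

theorem pv_lstrip_head_not (t : List Char) (c : Char)
    (h : (PySem.Chars.lstrip t)[0]? = some c) : PySem.Chars.isspace c = false := by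
  induction t with
  | nil => simp [PySem.Chars.lstrip] at h
  | cons a t ih =>
    by_cases ha : PySem.Chars.isspace a
    · exact ih (by simpa [PySem.Chars.lstrip, List.dropWhile_cons, ha] using h)
    · have hac : a = c := by simpa [PySem.Chars.lstrip, List.dropWhile_cons, ha] using h
      subst hac; simpa using ha

theorem pv_lstrip_of_head (t : List Char) (h : ∀ c, t[0]? = some c → PySem.Chars.isspace c = false) :
    PySem.Chars.lstrip t = t := by
  cases t with
  | nil => rfl
  | cons a t => simp [PySem.Chars.lstrip, List.dropWhile_cons, h a (by simp)]

theorem pv_dropWhile_idem (p : Char → Bool) (l : List Char) :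
    List.dropWhile p (List.dropWhile p l) = List.dropWhile p l := by
  induction l with
  | nil => rfl
  | cons a t ih =>
    by_cases ha : p a
    · simpa [List.dropWhile_cons, ha] using ih
    · simp [List.dropWhile_cons, ha]

theorem pv_rstrip_idem (t : List Char) :
    PySem.Chars.rstrip (PySem.Chars.rstrip t) = PySem.Chars.rstrip t := by
  simp [PySem.Chars.rstrip, pv_dropWhile_idem]

theorem pv_rstrip_prefix (t : List Char) : PySem.Chars.rstrip t <+: t := by
  obtain ⟨sfx, h1, _⟩ := pv_rstrip_decomp t
  exact ⟨sfx, h1.symm⟩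

theorem pv_strip_idem (x : List Char) : PySem.Chars.strip (PySem.Chars.strip x) = PySem.Chars.strip x := by
  have hl : PySem.Chars.lstrip (PySem.Chars.strip x) = PySem.Chars.strip x := by
    apply pv_lstrip_of_head
    intro c hc
    apply pv_lstrip_head_not x
    have hpre : PySem.Chars.strip x <+: PySem.Chars.lstrip x := pv_rstrip_prefix _
    obtain ⟨sfx, hs⟩ := hpre
    rw [← hs, List.getElem?_append_left (by
      have := (List.getElem?_eq_some_iff.mp hc).1
      omega)]
    exact hc
  show PySem.Chars.rstrip (PySem.Chars.lstrip (PySem.Chars.strip x)) = PySem.Chars.strip x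
  rw [hl]
  exact pv_rstrip_idem _

theorem pv_head_not_ws (j : List Char) (hj : PySem.Chars.strip j = j) (c : Char)
    (h : j[0]? = some c) : PySem.Chars.isspace c = false := by
  apply pv_lstrip_head_not j c
  have hlj : PySem.Chars.lstrip j = j := by
    have h1 : j <+: PySem.Chars.lstrip j := by
      have := pv_rstrip_prefix (PySem.Chars.lstrip j)
      rwa [show PySem.Chars.rstrip (PySem.Chars.lstrip j) = j from hj] at this
    have h2 : PySem.Chars.lstrip j <:+ j := List.dropWhile_suffix _
    exact h2.eq_of_length (le_antisymm (h2.length_le) (h1.length_le))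
  rw [hlj]; exact h

theorem pv_lowerChar_of_space (c : Char) (h : PySem.Chars.isspace c = true) :
    PySem.Chars.lowerChar c = c := by
  cases hu : PySem.Chars.isupper c with
  | false => simp [PySem.Chars.lowerChar, hu]
  | true =>
    exfalso
    simp only [PySem.Chars.isupper, Bool.and_eq_true, decide_eq_true_eq, Char.le_def] at hu
    have h1 : (65:Nat) ≤ c.toNat := UInt32.le_iff_toNat_le.mp hu.1
    have h2 : c.toNat ≤ (90:Nat) := UInt32.le_iff_toNat_le.mp hu.2
    simp only [PySem.Chars.isspace, Bool.or_eq_true, Bool.and_eq_true, decide_eq_true_eq] at h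
    omega

theorem pv_strip_take (j : List Char) (hj : PySem.Chars.strip j = j) (p : Nat) :
    ∃ q, q ≤ p ∧ q ≤ j.length ∧ PySem.Chars.strip (j.take p) = j.take q ∧
      ∀ i c, q ≤ i → i < p → j[i]? = some c → PySem.Chars.isspace c = true := by
  by_cases ht : j.take p = []
  · refine ⟨0, Nat.zero_le _, Nat.zero_le _, by simp [ht, PySem.Chars.strip, PySem.Chars.lstrip, PySem.Chars.rstrip], ?_⟩
    intro i c hqi hip hget
    exfalso
    have hlen : i < j.length := (List.getElem?_eq_some_iff.mp hget).1
    have : j.take p ≠ [] := by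
      apply List.ne_nil_of_length_pos
      simp [List.length_take]
      omega
    exact this ht
  · have hls : PySem.Chars.lstrip (j.take p) = j.take p := by
      apply pv_lstrip_of_head
      intro c hc
      apply pv_head_not_ws j hj
      rw [List.getElem?_take] at hc
      · split at hc
        · exact hc
        · exact absurd hc (by simp)
    have hstrip : PySem.Chars.strip (j.take p) = PySem.Chars.rstrip (j.take p) := by
      show PySem.Chars.rstrip (PySem.Chars.lstrip (j.take p)) = _
      rw [hls]
    obtain ⟨sfx, hdec, hws⟩ := pv_rstrip_decomp (j.take p)
    set r := PySem.Chars.rstrip (j.take p) with hr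
    have hpre : r <+: j := List.IsPrefix.trans ⟨sfx, hdec.symm⟩ (List.take_prefix p j)
    have hrq : r = j.take r.length := List.prefix_iff_eq_take.mp hpre
    have hrlen : r.length ≤ j.length := hpre.length_le
    have hrp : r.length ≤ p := by
      have : r.length + sfx.length = (j.take p).length := by
        rw [hdec]; simp
      simp [List.length_take] at this
      omega
    refine ⟨r.length, hrp, hrlen, by rw [hstrip, ← hrq], ?_⟩
    intro i c hqi hip hget
    have hlen : i < j.length := (List.getElem?_eq_some_iff.mp hget).1
    have hitake : (j.take p)[i]? = some c := by
      rw [List.getElem?_take, if_pos hip]; exact hget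
    rw [hdec, List.getElem?_append_right hqi] at hitake
    have : sfx[i - r.length]? = some c := hitake
    exact hws c (List.mem_of_getElem? this)

def MarkerOK (m : List Char) : Prop :=
  m[0]? = some '(' ∧ (∀ c, m[m.length - 1]? = some c → PySem.Chars.isspace c = false) ∧
    ∀ off, 1 ≤ off → m[off]? ≠ some '('

set_option maxRecDepth 8192 in
theorem pv_markers_ok : ∀ m ∈ pvMarkers, MarkerOK m := by
  intro m hm
  unfold MarkerOK
  fin_cases hm <;> refine ⟨by decide, ?_, ?_⟩ <;> first
  | (intro c hc
     first
     | rw [show (['(', 'd', 'e', 'l', 'i', 'v', 'e', 'r', 'i', 'n', 'g'])[(['(', 'd', 'e', 'l', 'i', 'v', 'e', 'r', 'i', 'n', 'g']).length - 1]? = some 'g' from by decide] at hc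
     | rw [show (['(', 'w', 'i', 't', 'h', ' ', 'w', 'h', 'o', 'm'])[(['(', 'w', 'i', 't', 'h', ' ', 'w', 'h', 'o', 'm']).length - 1]? = some 'm' from by decide] at hc
     | rw [show (['(', 'f', 'o', 'r', ' ', 't', 'h', 'e', ' ', 'c', 'o', 'u', 'r', 't'])[(['(', 'f', 'o', 'r', ' ', 't', 'h', 'e', ' ', 'c', 'o', 'u', 'r', 't']).length - 1]? = some 't' from by decide] at hc
     cases hc
     decide)
  | (intro off hoff
     rcases Nat.lt_or_ge off 14 with h | h
     · interval_cases off <;> decide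
     · rw [List.getElem?_eq_none (by simpa using by omega)]
       simp)

theorem pv_find_eq_natCast (l m : List Char) (i : Nat) (hocc : m <+: l.drop i)
    (hmin : ∀ i' < i, ¬ m <+: l.drop i') : PySem.Chars.find l m = (i : Int) := by
  have hinf : m <:+: l := hocc.isInfix.trans (List.drop_suffix i l).isInfix
  have hne : PySem.Chars.find l m ≠ -1 := (PySem.Chars.find_ne_neg_one_iff l m).mpr hinf
  have h0 : 0 ≤ PySem.Chars.find l m := by
    have := PySem.Chars.neg_one_le_find l m
    omega
  obtain ⟨hocc', hmin'⟩ := PySem.Chars.find_spec h0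
  have : (PySem.Chars.find l m).toNat = i := by
    rcases Nat.lt_trichotomy (PySem.Chars.find l m).toNat i with h | h | h
    · exact absurd hocc' (hmin _ h)
    · exact h
    · exact absurd hocc (hmin' _ h)
  omega

theorem pv_find_lt_length (l m : List Char) (hm : m ≠ []) (h : 0 ≤ PySem.Chars.find l m) :
    PySem.Chars.find l m < (l.length : Int) := by
  obtain ⟨hocc, -⟩ := PySem.Chars.find_spec h
  have hle := PySem.Chars.find_le_length l m
  rcases lt_or_eq_of_le hle with h' | h'
  · exact h'
  · exfalso
    rw [h'] at hocc
    simp at hocc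
    exact hm hocc

theorem pv_prefix_getElem? (xs ys : List Char) (i : Nat) (h : xs <+: ys) (hi : i < xs.length) :
    ys[i]? = xs[i]? := by
  obtain ⟨t, rfl⟩ := h
  rw [List.getElem?_append_left hi]

theorem pv_occ_take (l m : List Char) (i q : Nat) (h1 : m <+: l.drop i) (h2 : i + m.length ≤ q) :
    m <+: (l.take q).drop i := by
  rw [List.drop_take]
  exact List.prefix_take_iff.mpr ⟨h1, by omega⟩

theorem pv_occ_of_occ_take (l m : List Char) (i q : Nat) (h : m <+: (l.take q).drop i) :
    m <+: l.drop i ∧ m.length ≤ q - i := by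
  rw [List.drop_take] at h
  exact List.prefix_take_iff.mp h

theorem pv_find_take_eq_neg_one (l m : List Char) (q : Nat)
    (h : ∀ i', m <+: l.drop i' → ¬ (i' + m.length ≤ q)) :
    PySem.Chars.find (l.take q) m = -1 := by
  rw [PySem.Chars.find_eq_neg_one_iff]
  intro hinf
  obtain ⟨i', hi'⟩ := (PySem.Chars.exists_prefix_drop_iff_isIn m (l.take q)).mpr
    ((PySem.Chars.isIn_iff_infix m (l.take q)).mpr hinf)
  obtain ⟨ho, hlen⟩ := pv_occ_of_occ_take l m i' q hi'
  rcases Nat.lt_or_ge q i' with hiq | hiq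
  case _ =>
    have hm0 : m.length = 0 := by omega
    have : m = [] := List.eq_nil_of_length_eq_zero hm0
    subst this
    exact h 0 (List.nil_prefix) (by simpa using by omega)
  case _ => exact h i' ho (by omega)

theorem pv_step_found (j : List Char) (hj : PySem.Chars.strip j = j) (m : List Char) (hm : MarkerOK m)
    (p q : Nat) (hqp : q ≤ p) (hpl : p ≤ j.length)
    (hws : ∀ i c, q ≤ i → i < p → j[i]? = some c → PySem.Chars.isspace c = true)
    (hp : p = j.length ∨ (PySem.Chars.lower j)[p]? = some '(')
    (hf0 : 0 ≤ PySem.Chars.find (PySem.Chars.lower j) m)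
    (hfp : PySem.Chars.find (PySem.Chars.lower j) m < (p : Int)) :
    PySem.Chars.find ((PySem.Chars.lower j).take q) m = PySem.Chars.find (PySem.Chars.lower j) m ∧
      (PySem.Chars.find (PySem.Chars.lower j) m).toNat + m.length ≤ q := by
  set l := PySem.Chars.lower j with hl
  set i := (PySem.Chars.find l m).toNat with hi
  have hip : i < p := by omega
  have hmne : 0 < m.length := by
    have := hm.1
    have := (List.getElem?_eq_some_iff.mp this).1
    omega
  have hllen : l.length = j.length := by simp [hl, PySem.Chars.lower]
  obtain ⟨hocc, hmin⟩ := PySem.Chars.find_spec hf0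
  rw [← hi] at hocc hmin
  have key : i + m.length ≤ q := by
    by_contra hq
    push_neg at hq
    set e := i + m.length - 1 with he
    have hlt : m.length - 1 < m.length := by omega
    have hme : m[m.length - 1]? = some (m[m.length - 1]'hlt) := List.getElem?_eq_getElem hlt
    have hlc : l[e]? = some (m[m.length - 1]'hlt) := by
      have h1 : (l.drop i)[m.length - 1]? = m[m.length - 1]? := pv_prefix_getElem? m _ _ hocc hlt
      rw [List.getElem?_drop] at h1
      rw [show e = i + (m.length - 1) from by omega]
      rw [h1, hme]
    have helen : e < l.length := (List.getElem?_eq_some_iff.mp hlc).1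
    rcases Nat.lt_or_ge e p with hep | hep
    · -- last marker char falls into the whitespace tail: impossible
      obtain ⟨c', hc', hlow⟩ : ∃ c', j[e]? = some c' ∧ PySem.Chars.lowerChar c' = m[m.length - 1]'hlt := by
        have : l[e]? = (j[e]?).map PySem.Chars.lowerChar := by
          simp [hl, PySem.Chars.lower]
        rw [this] at hlc
        cases hje : j[e]? with
        | none => rw [hje] at hlc; simp at hlc
        | some c' => rw [hje] at hlc; simp at hlc; exact ⟨c', rfl, hlc⟩
      have hwsc : PySem.Chars.isspace c' = true := hws e c' (by omega) hep hc'
      have : PySem.Chars.isspace (m[m.length - 1]'hlt) = true := by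
        rw [← hlow, pv_lowerChar_of_space c' hwsc]; exact hwsc
      rw [hm.2.1 _ hme] at this
      exact Bool.false_ne_true this
    · -- the cut position p falls strictly inside the marker occurrence: impossible
      have hpne : p ≠ j.length := by omega
      have hpopen : l[p]? = some '(' := hp.resolve_left hpne
      have hoff : p - i < m.length := by omega
      have h1 : (l.drop i)[p - i]? = m[p - i]? := pv_prefix_getElem? m _ _ hocc hoff
      rw [List.getElem?_drop, show i + (p - i) = p from by omega, hpopen] at h1
      exact hm.2.2 (p - i) (by omega) h1.symm
  refine ⟨?_, key⟩
  have := pv_find_eq_natCast (l.take q) m i (pv_occ_take l m i q hocc key)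
    (fun i' hi' hocc' => hmin i' hi' (pv_occ_of_occ_take l m i' q hocc').1)
  rw [this]
  omega

theorem pv_step_notfound (j : List Char) (m : List Char) (hm : MarkerOK m) (p q : Nat)
    (hqp : q ≤ p)
    (h : ¬ (0 ≤ PySem.Chars.find (PySem.Chars.lower j) m ∧ PySem.Chars.find (PySem.Chars.lower j) m < (p : Int))) :
    PySem.Chars.find ((PySem.Chars.lower j).take q) m = -1 := by
  set l := PySem.Chars.lower j with hl
  have hmne : 0 < m.length := by
    have := (List.getElem?_eq_some_iff.mp hm.1).1
    omega
  apply pv_find_take_eq_neg_one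
  intro i' hocc' hle
  rcases Nat.lt_or_ge 0 (PySem.Chars.find l m).toNat.succ with _ | _
  · by_cases hf0 : 0 ≤ PySem.Chars.find l m
    · have hfp : ((p : Int)) ≤ PySem.Chars.find l m := by
        omega
      obtain ⟨-, hmin⟩ := PySem.Chars.find_spec hf0
      exact hmin i' (by omega) hocc'
    · have hfneg : PySem.Chars.find l m = -1 := by
        have := PySem.Chars.neg_one_le_find l m
        omega
      have hninf := (PySem.Chars.find_eq_neg_one_iff l m).mp hfneg
      exact hninf (hocc'.isInfix.trans (List.drop_suffix i' l).isInfix)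
  · omega

def pvCutFold (j : List Char) (ms : List (List Char)) (p : Nat) : Nat :=
  ms.foldl (fun acc m =>
    if 0 ≤ PySem.Chars.find (PySem.Chars.lower j) m ∧ PySem.Chars.find (PySem.Chars.lower j) m < (acc : Int)
    then (PySem.Chars.find (PySem.Chars.lower j) m).toNat else acc) p

theorem pv_lower_take (j : List Char) (q : Nat) :
    PySem.Chars.lower (j.take q) = (PySem.Chars.lower j).take q := by
  simp [PySem.Chars.lower, List.map_take]

theorem pv_fold_inv (j : List Char) (hj : PySem.Chars.strip j = j) (ms : List (List Char))
    (hms : ∀ m ∈ ms, MarkerOK m) :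
    ∀ (p q : Nat), q ≤ p → p ≤ j.length →
      (∀ i c, q ≤ i → i < p → j[i]? = some c → PySem.Chars.isspace c = true) →
      (p = j.length ∨ (PySem.Chars.lower j)[p]? = some '(') →
      PySem.Chars.strip (j.take p) = j.take q →
      ms.foldl pvStepA (j.take q, PySem.Chars.lower (j.take q)) =
        (PySem.Chars.strip (j.take (pvCutFold j ms p)),
         PySem.Chars.lower (PySem.Chars.strip (j.take (pvCutFold j ms p)))) := by
  induction ms with
  | nil =>
    intro p q h1 h2 h3 h4 h5
    simp only [pvCutFold, List.foldl_nil]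
    rw [h5]
  | cons m ms ih =>
    intro p q h1 h2 h3 h4 h5
    have hmok : MarkerOK m := hms m (by simp)
    have hmsok : ∀ m' ∈ ms, MarkerOK m' := fun m' hm' => hms m' (by simp [hm'])
    simp only [List.foldl_cons]
    by_cases hcond : 0 ≤ PySem.Chars.find (PySem.Chars.lower j) m ∧
        PySem.Chars.find (PySem.Chars.lower j) m < (p : Int)
    · obtain ⟨hfq, hkey⟩ := pv_step_found j hj m hmok p q h1 h2 h3 h4 hcond.1 hcond.2
      set f := PySem.Chars.find (PySem.Chars.lower j) m with hf
      have hne : f ≠ -1 := by omega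
      have hmi : PySem.Chars.find (PySem.Chars.lower (j.take q)) m = f := by
        rw [pv_lower_take]; exact hfq
      have hstep : pvStepA (j.take q, PySem.Chars.lower (j.take q)) m =
          (PySem.Chars.strip (j.take f.toNat), PySem.Chars.lower (PySem.Chars.strip (j.take f.toNat))) := by
        simp only [pvStepA, hmi, if_pos hne]
        rw [PySem.List.slice_to _ hcond.1, List.take_take, Nat.min_eq_left (by omega)]
      rw [hstep]
      obtain ⟨q', hq'1, hq'2, hq'3, hq'4⟩ := pv_strip_take j hj f.toNat
      rw [hq'3]
      have hpnew : (PySem.Chars.lower j)[f.toNat]? = some '(' := by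
        obtain ⟨hocc, -⟩ := PySem.Chars.find_spec hcond.1
        have hmlen : 0 < m.length := by
          have := (List.getElem?_eq_some_iff.mp hmok.1).1; omega
        have := pv_prefix_getElem? m _ 0 hocc hmlen
        rw [List.getElem?_drop] at this
        rw [show f.toNat + 0 = f.toNat from by omega] at this
        rw [this, hmok.1]
      have hK : pvCutFold j (m :: ms) p = pvCutFold j ms f.toNat := by
        simp only [pvCutFold, List.foldl_cons]
        rw [← hf, if_pos hcond]
      rw [hK]
      exact ih hmsok f.toNat q' hq'1 (by omega) hq'4 (Or.inr hpnew) hq'3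
    · have hmi : PySem.Chars.find (PySem.Chars.lower (j.take q)) m = -1 := by
        rw [pv_lower_take]; exact pv_step_notfound j m hmok p q h1 hcond
      have hstep : pvStepA (j.take q, PySem.Chars.lower (j.take q)) m =
          (j.take q, PySem.Chars.lower (j.take q)) := by
        simp [pvStepA, hmi]
      rw [hstep]
      have hK : pvCutFold j (m :: ms) p = pvCutFold j ms p := by
        simp only [pvCutFold, List.foldl_cons]
        rw [if_neg hcond]
      rw [hK]
      exact ih hmsok p q h1 h2 h3 h4 h5

theorem pv_main (j : List Char) (hj : PySem.Chars.strip j = j) :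
    (pvMarkers.foldl pvStepA (j, PySem.Chars.lower j)).1 =
      (match (pvMarkers.map (fun m => PySem.Chars.find (PySem.Chars.lower j) m)).filter (fun i => i ≠ -1) with
        | [] => j
        | h :: t => PySem.Chars.strip (PySem.List.slice j none (some (t.foldl min h)))) := by
  have hinv := pv_fold_inv j hj pvMarkers pv_markers_ok j.length j.length le_rfl le_rfl
    (by intro i c hqi hip _; omega)
    (Or.inl rfl) (by rw [List.take_length]; exact hj)
  rw [List.take_length] at hinv
  rw [hinv]
  have hlen : (PySem.Chars.lower j).length = j.length := by simp [PySem.Chars.lower]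
  set f1 := PySem.Chars.find (PySem.Chars.lower j) ['(', 'd', 'e', 'l', 'i', 'v', 'e', 'r', 'i', 'n', 'g'] with hf1
  set f2 := PySem.Chars.find (PySem.Chars.lower j) ['(', 'w', 'i', 't', 'h', ' ', 'w', 'h', 'o', 'm'] with hf2
  set f3 := PySem.Chars.find (PySem.Chars.lower j) ['(', 'f', 'o', 'r', ' ', 't', 'h', 'e', ' ', 'c', 'o', 'u', 'r', 't'] with hf3
  have hb1 : f1 = -1 ∨ (0 ≤ f1 ∧ f1 < (j.length : Int)) := by
    by_cases h : 0 ≤ f1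
    · right
      refine ⟨h, ?_⟩
      have := pv_find_lt_length (PySem.Chars.lower j) ['(', 'd', 'e', 'l', 'i', 'v', 'e', 'r', 'i', 'n', 'g'] (by decide) (hf1 ▸ h)
      omega
    · left
      have := PySem.Chars.neg_one_le_find (PySem.Chars.lower j) ['(', 'd', 'e', 'l', 'i', 'v', 'e', 'r', 'i', 'n', 'g']
      omega
  have hb2 : f2 = -1 ∨ (0 ≤ f2 ∧ f2 < (j.length : Int)) := by
    by_cases h : 0 ≤ f2
    · right
      refine ⟨h, ?_⟩
      have := pv_find_lt_length (PySem.Chars.lower j) ['(', 'w', 'i', 't', 'h', ' ', 'w', 'h', 'o', 'm'] (by decide) (hf2 ▸ h)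
      omega
    · left
      have := PySem.Chars.neg_one_le_find (PySem.Chars.lower j) ['(', 'w', 'i', 't', 'h', ' ', 'w', 'h', 'o', 'm']
      omega
  have hb3 : f3 = -1 ∨ (0 ≤ f3 ∧ f3 < (j.length : Int)) := by
    by_cases h : 0 ≤ f3
    · right
      refine ⟨h, ?_⟩
      have := pv_find_lt_length (PySem.Chars.lower j) ['(', 'f', 'o', 'r', ' ', 't', 'h', 'e', ' ', 'c', 'o', 'u', 'r', 't'] (by decide) (hf3 ▸ h)
      omega
    · left
      have := PySem.Chars.neg_one_le_find (PySem.Chars.lower j) ['(', 'f', 'o', 'r', ' ', 't', 'h', 'e', ' ', 'c', 'o', 'u', 'r', 't']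
      omega
  simp only [pvMarkers, List.map_cons, List.map_nil, ← hf1, ← hf2, ← hf3]
  rcases hb1 with h1 | h1 <;> rcases hb2 with h2 | h2 <;> rcases hb3 with h3 | h3
  · -- none found
    simp only [h1, h2, h3]
    norm_num
    have hKM : pvCutFold j [['(', 'd', 'e', 'l', 'i', 'v', 'e', 'r', 'i', 'n', 'g'], ['(', 'w', 'i', 't', 'h', ' ', 'w', 'h', 'o', 'm'], ['(', 'f', 'o', 'r', ' ', 't', 'h', 'e', ' ', 'c', 'o', 'u', 'r', 't']] j.length = j.length := by
      simp only [pvCutFold, List.foldl_cons, List.foldl_nil, ← hf1, ← hf2, ← hf3]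
      split_ifs <;> omega
    rw [hKM, List.take_length, hj]
  · -- only f3
    have e3 : f3 ≠ -1 := by omega
    simp [h1, h2, e3]
    rw [PySem.List.slice_to _ (by omega)]
    have hKM : pvCutFold j [['(', 'd', 'e', 'l', 'i', 'v', 'e', 'r', 'i', 'n', 'g'], ['(', 'w', 'i', 't', 'h', ' ', 'w', 'h', 'o', 'm'], ['(', 'f', 'o', 'r', ' ', 't', 'h', 'e', ' ', 'c', 'o', 'u', 'r', 't']] j.length = f3.toNat := by
      simp only [pvCutFold, List.foldl_cons, List.foldl_nil, ← hf1, ← hf2, ← hf3]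
      split_ifs <;> omega
    rw [hKM]
  · -- only f2
    have e2 : f2 ≠ -1 := by omega
    simp [h1, h3, e2]
    rw [PySem.List.slice_to _ (by omega)]
    have hKM : pvCutFold j [['(', 'd', 'e', 'l', 'i', 'v', 'e', 'r', 'i', 'n', 'g'], ['(', 'w', 'i', 't', 'h', ' ', 'w', 'h', 'o', 'm'], ['(', 'f', 'o', 'r', ' ', 't', 'h', 'e', ' ', 'c', 'o', 'u', 'r', 't']] j.length = f2.toNat := by
      simp only [pvCutFold, List.foldl_cons, List.foldl_nil, ← hf1, ← hf2, ← hf3]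
      split_ifs <;> omega
    rw [hKM]
  · -- f2 and f3
    have e2 : f2 ≠ -1 := by omega
    have e3 : f3 ≠ -1 := by omega
    simp [h1, e2, e3]
    rw [PySem.List.slice_to _ (by omega)]
    have hKM : pvCutFold j [['(', 'd', 'e', 'l', 'i', 'v', 'e', 'r', 'i', 'n', 'g'], ['(', 'w', 'i', 't', 'h', ' ', 'w', 'h', 'o', 'm'], ['(', 'f', 'o', 'r', ' ', 't', 'h', 'e', ' ', 'c', 'o', 'u', 'r', 't']] j.length = (min f2 f3).toNat := by
      simp only [pvCutFold, List.foldl_cons, List.foldl_nil, ← hf1, ← hf2, ← hf3]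
      split_ifs <;> omega
    rw [hKM]
  · -- only f1
    have e1 : f1 ≠ -1 := by omega
    simp [h2, h3, e1]
    rw [PySem.List.slice_to _ (by omega)]
    have hKM : pvCutFold j [['(', 'd', 'e', 'l', 'i', 'v', 'e', 'r', 'i', 'n', 'g'], ['(', 'w', 'i', 't', 'h', ' ', 'w', 'h', 'o', 'm'], ['(', 'f', 'o', 'r', ' ', 't', 'h', 'e', ' ', 'c', 'o', 'u', 'r', 't']] j.length = f1.toNat := by
      simp only [pvCutFold, List.foldl_cons, List.foldl_nil, ← hf1, ← hf2, ← hf3]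
      split_ifs <;> omega
    rw [hKM]
  · -- f1 and f3
    have e1 : f1 ≠ -1 := by omega
    have e3 : f3 ≠ -1 := by omega
    simp [h2, e1, e3]
    rw [PySem.List.slice_to _ (by omega)]
    have hKM : pvCutFold j [['(', 'd', 'e', 'l', 'i', 'v', 'e', 'r', 'i', 'n', 'g'], ['(', 'w', 'i', 't', 'h', ' ', 'w', 'h', 'o', 'm'], ['(', 'f', 'o', 'r', ' ', 't', 'h', 'e', ' ', 'c', 'o', 'u', 'r', 't']] j.length = (min f1 f3).toNat := by
      simp only [pvCutFold, List.foldl_cons, List.foldl_nil, ← hf1, ← hf2, ← hf3]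
      split_ifs <;> omega
    rw [hKM]
  · -- f1 and f2
    have e1 : f1 ≠ -1 := by omega
    have e2 : f2 ≠ -1 := by omega
    simp [h3, e1, e2]
    rw [PySem.List.slice_to _ (by omega)]
    have hKM : pvCutFold j [['(', 'd', 'e', 'l', 'i', 'v', 'e', 'r', 'i', 'n', 'g'], ['(', 'w', 'i', 't', 'h', ' ', 'w', 'h', 'o', 'm'], ['(', 'f', 'o', 'r', ' ', 't', 'h', 'e', ' ', 'c', 'o', 'u', 'r', 't']] j.length = (min f1 f2).toNat := by
      simp only [pvCutFold, List.foldl_cons, List.foldl_nil, ← hf1, ← hf2, ← hf3]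
      split_ifs <;> omega
    rw [hKM]
  · -- all three
    have e1 : f1 ≠ -1 := by omega
    have e2 : f2 ≠ -1 := by omega
    have e3 : f3 ≠ -1 := by omega
    simp [e1, e2, e3]
    rw [PySem.List.slice_to _ (by omega)]
    have hKM : pvCutFold j [['(', 'd', 'e', 'l', 'i', 'v', 'e', 'r', 'i', 'n', 'g'], ['(', 'w', 'i', 't', 'h', ' ', 'w', 'h', 'o', 'm'], ['(', 'f', 'o', 'r', ' ', 't', 'h', 'e', ' ', 'c', 'o', 'u', 'r', 't']] j.length = (min (min f1 f2) f3).toNat := by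
      simp only [pvCutFold, List.foldl_cons, List.foldl_nil, ← hf1, ← hf2, ← hf3]
      split_ifs <;> omega
    rw [hKM]
    rw [show (min (min f1 f2) f3).toNat = (min f1 (min f2 f3)).toNat from by omega]

-- ===== VERDICT (by name: the statement is the Claim_ definition above) =====
theorem clean_judge_name_py_spec : Claim_equal_clean_judge_name_py := by
  intro judge_raw _
  unfold Spec_clean_judge_name_py clean_judge_name_py clean_judge_name_py_alt
  have h := pv_main (PySem.Chars.strip (PySem.Chars.replace judge_raw.toList [':'] []))
    (pv_strip_idem _)
  simp only at h ⊢
  rw [h]
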